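-- pv_equiv track=rewrite | github.com/DreamingHunter/UTPB-COSC-6350-Project4 | handshakes.py | simplifyAesEncrypt
-- ===== SOURCE A (Python) =====
-- def xorBytes(byte_data, key):
--     return [b ^ key for b in byte_data]
--
-- def simplifyAesEncrypt(session_key, plaintext):
--     rounds = 5
--     byte_data = [ord(c) for c in plaintext]
--
--     byte_data = xorBytes(byte_data, session_key)
--
--     for _ in range(rounds):
--         byte_data = xorBytes(byte_data, session_key)
--         byte_data = byte_data[1:] + byte_data[:1]
--
--     return byte_data
-- ===== SOURCE B (Python) =====
-- def simplifyAesEncrypt(session_key, plaintext):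
--     # The key XOR is applied an even number of times (6) so it cancels;
--     # the 5 single-step rotations compose into one rotation by 5 mod n.
--     byte_data = [ord(c) for c in plaintext]
--     n = len(byte_data)
--     if n == 0:
--         return []
--     r = 5 % n
--     return byte_data[r:] + byte_data[:r]
-- ===== Notes on version B (the rewrite author's own statement) =====
-- stated objective: simpler
-- what changed: Replaced the 5-round XOR+rotate loop by a single closed-form rotation: the 6 XORs with the same key cancel pairwise and the 5 one-step rotations compose into one rotation by 5 mod n, so B just slices the byte list once (session_key provably has no effect).
import Mathlib
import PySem

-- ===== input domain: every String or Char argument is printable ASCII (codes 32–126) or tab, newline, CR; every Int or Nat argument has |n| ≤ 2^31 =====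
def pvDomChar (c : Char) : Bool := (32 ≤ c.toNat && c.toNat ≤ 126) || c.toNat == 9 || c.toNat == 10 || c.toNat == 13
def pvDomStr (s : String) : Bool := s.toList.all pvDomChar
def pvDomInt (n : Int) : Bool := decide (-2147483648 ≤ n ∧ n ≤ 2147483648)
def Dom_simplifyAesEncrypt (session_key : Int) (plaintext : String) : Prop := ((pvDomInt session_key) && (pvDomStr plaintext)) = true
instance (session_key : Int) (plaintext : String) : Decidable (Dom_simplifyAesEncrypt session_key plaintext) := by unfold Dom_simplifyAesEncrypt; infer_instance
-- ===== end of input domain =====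

-- B replaces A's 5-round XOR+rotate loop by one closed-form rotation (the key XORs cancel); objective: simpler.
-- ===== PORT A =====
def xorBytes (byte_data : List Int) (key : Int) : List Int :=
  byte_data.map (fun b => PySem.Int.bxor b key)

def simplifyAesEncrypt (session_key : Int) (plaintext : String) : List Int :=
  let byte_data := plaintext.toList.map (fun c => (c.toNat : Int))
  let byte_data := xorBytes byte_data session_key
  (List.range 5).foldl
    (fun bd _ =>
      let bd := xorBytes bd session_key
      bd.drop 1 ++ bd.take 1)
    byte_data

-- ===== PORT B =====
-- Nat `%` is exact here for Python's `5 % n`: both operands are nonnegative and n > 0.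
def simplifyAesEncrypt_alt (session_key : Int) (plaintext : String) : List Int :=
  let byte_data := plaintext.toList.map (fun c => (c.toNat : Int))
  let n := byte_data.length
  if n = 0 then []
  else
    let r := 5 % n
    byte_data.drop r ++ byte_data.take r

-- ===== PRECONDITION & SPEC =====
def Spec_simplifyAesEncrypt (session_key : Int) (plaintext : String) (out : List Int) : Prop := out = simplifyAesEncrypt_alt session_key plaintext
instance (session_key : Int) (plaintext : String) (out : List Int) : Decidable (Spec_simplifyAesEncrypt session_key plaintext out) := by unfold Spec_simplifyAesEncrypt; infer_instance

-- ===== CLAIM (what is proved, stated in full; the proofs are below) =====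
def Claim_equal_simplifyAesEncrypt : Prop := ∀ (session_key : Int) (plaintext : String), Dom_simplifyAesEncrypt session_key plaintext → Spec_simplifyAesEncrypt session_key plaintext (simplifyAesEncrypt session_key plaintext)

-- ===== LEMMAS AND PROOFS =====

theorem bxor_eq_xor (a b : Int) : PySem.Int.bxor a b = Int.xor a b := by
  cases a <;> cases b <;>
    simp [PySem.Int.bxor, Int.xor, Int.negSucc_eq] <;> omega

theorem bxor_cancel (a k : Int) : PySem.Int.bxor (PySem.Int.bxor a k) k = a := by
  rw [bxor_eq_xor, bxor_eq_xor]
  cases a <;> cases k <;> simp [Int.xor, Nat.xor_xor_cancel_right]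

theorem xorBytes_xorBytes (l : List Int) (k : Int) : xorBytes (xorBytes l k) k = l := by
  simp only [xorBytes, List.map_map, Function.comp_def, bxor_cancel, List.map_id']

theorem xorBytes_rotate (l : List Int) (k : Int) (n : Nat) :
    xorBytes (l.rotate n) k = (xorBytes l k).rotate n := by
  simp [xorBytes, List.map_rotate]

theorem drop_append_take_eq_rotate (l : List Int) : l.drop 1 ++ l.take 1 = l.rotate 1 := by
  cases l with
  | nil => simp
  | cons a t =>
      rw [List.rotate_eq_drop_append_take (by simp)]

theorem portA_eq_rotate (sk : Int) (p : String) :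
    simplifyAesEncrypt sk p = (p.toList.map (fun c => (c.toNat : Int))).rotate 5 := by
  unfold simplifyAesEncrypt
  show ((List.range 5).foldl _ _) = _
  rw [show List.range 5 = [0, 1, 2, 3, 4] from rfl]
  simp only [List.foldl, drop_append_take_eq_rotate, xorBytes_rotate, xorBytes_xorBytes,
    List.rotate_rotate]

theorem portB_eq_rotate (sk : Int) (p : String) :
    simplifyAesEncrypt_alt sk p = (p.toList.map (fun c => (c.toNat : Int))).rotate 5 := by
  unfold simplifyAesEncrypt_alt
  set l := p.toList.map (fun c => (c.toNat : Int)) with hl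
  by_cases h : l.length = 0
  · simp [List.eq_nil_of_length_eq_zero h]
  · have hn : 0 < l.length := Nat.pos_of_ne_zero h
    rw [if_neg h]
    show List.drop (5 % l.length) l ++ List.take (5 % l.length) l = l.rotate 5
    rw [← List.rotate_mod, List.rotate_eq_drop_append_take (Nat.le_of_lt (Nat.mod_lt _ hn))]

-- ===== VERDICT (by name: the statement is the Claim_ definition above) =====
theorem simplifyAesEncrypt_spec : Claim_equal_simplifyAesEncrypt := by
  intro sk p _
  unfold Spec_simplifyAesEncrypt
  rw [portA_eq_rotate, portB_eq_rotate]
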